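-- pv_equiv track=rewrite | github.com/ZeusWPI/VPW-voorbereiding-2014 | handschriftherkenning/oplossing.py | popLetter
-- ===== SOURCE A (Python) =====
-- def multistrip(l):
--     while l[0] and all([s[0]==' ' for s in l]):
--         for i in range(len(l)):
--             l[i] = l[i][1:]
--
-- def popLetter(l):
--     multistrip(l)
--     if not l[0]: return
--     i = 0
--     while i<len(l[0]) and any([s[i]!=' ' for s in l]):
--         i+=1
--     letter = '\n'.join([s[:i] for s in l])
--     for j in range(len(l)):
--         l[j] = l[j][i:]
--     return letter
-- ===== SOURCE B (Python) =====
-- def popLetter(l):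
--     w0 = len(l[0])
--     start = 0
--     while start < w0 and all(s[start] == ' ' for s in l):
--         start += 1
--     if start == w0:
--         for j in range(len(l)):
--             l[j] = l[j][start:]
--         return None
--     end = start
--     while end < w0 and any(s[end] != ' ' for s in l):
--         end += 1
--     letter = '\n'.join(s[start:end] for s in l)
--     for j in range(len(l)):
--         l[j] = l[j][end:]
--     return letter
-- ===== Notes on version B (the rewrite author's own statement) =====
-- stated objective: alternative
-- what changed: B finds the glyph's start and end columns with one left-to-right index scan and slices each line once, instead of A's multistrip loop that re-slices every line for every leading blank column and then joins prefixes of the stripped lines.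
-- outside the precondition, e.g. on popLetter(['a b', 'c ']): A returns 'a\nc', B returns 'a\nc'
import Mathlib
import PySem

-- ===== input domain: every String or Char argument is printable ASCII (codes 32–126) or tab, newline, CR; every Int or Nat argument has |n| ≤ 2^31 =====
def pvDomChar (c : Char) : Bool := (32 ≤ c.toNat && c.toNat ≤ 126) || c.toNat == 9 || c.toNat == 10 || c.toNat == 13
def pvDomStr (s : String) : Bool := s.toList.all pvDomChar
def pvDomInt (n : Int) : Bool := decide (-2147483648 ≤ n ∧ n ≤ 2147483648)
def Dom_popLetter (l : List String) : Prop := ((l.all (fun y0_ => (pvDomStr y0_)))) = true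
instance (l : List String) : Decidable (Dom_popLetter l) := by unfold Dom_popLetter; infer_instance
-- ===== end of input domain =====

-- B replaces A's repeated column-by-column re-slicing (multistrip) by a single left-to-right
-- index scan for the glyph's start/end columns and one slice per line; equivalence is about the
-- RETURN value (both Pythons also mutate l, and do so identically; mutation is not modelled here).

-- ===== PORT A =====
-- multistrip: repeatedly drop the first column while row 0 is nonempty and the column is all
-- spaces; fuel = current length of row 0 (each pass shortens row 0 by 1, so the initial length
-- bounds the loop; at fuel 0 row 0 is empty and Python's loop stops too).
-- Python's s[0] raises IndexError on a row shorter than row 0; such inputs are outside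
-- Pre_popLetter, and inside it s.getD 0 ' ' is exactly s[0].
def multistripGo : List (List Char) → Nat → List (List Char)
  | rows, 0 => rows
  | rows, fuel+1 =>
      if rows.headD [] ≠ [] ∧ (rows.all (fun s => s.getD 0 ' ' = ' ')) = true then
        multistripGo (rows.map (List.drop 1)) fuel
      else rows

-- the 'while i < len(l[0]) and any([s[i] != ' ' for s in l])' loop; s.getD i ' ' is exact inside Pre_.
def findIA (rows : List (List Char)) (n i : Nat) : Nat :=
  if i < n ∧ (rows.any (fun s => s.getD i ' ' ≠ ' ')) = true then findIA rows n (i+1) else i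
termination_by n - i
decreasing_by omega

def popLetter (l : List String) : Option String :=
  match l with
  | [] => none   -- Python: l[0] raises IndexError; outside Pre_popLetter
  | _ :: _ =>
    let rows := l.map String.toList
    let rows' := multistripGo rows (rows.headD []).length
    let h' := rows'.headD []
    if h' = [] then none
    else
      let i := findIA rows' h'.length 0
      some (String.intercalate "\n" (rows'.map (fun s => String.ofList (s.take i))))

-- ===== PORT B =====
-- start scan: while start < w0 and all(s[start] == ' ' for s in l)
def scanSpaces (rows : List (List Char)) (w i : Nat) : Nat :=
  if i < w ∧ (rows.all (fun s => s.getD i ' ' = ' ')) = true then scanSpaces rows w (i+1) else i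
termination_by w - i
decreasing_by omega

-- end scan: while end < w0 and any(s[end] != ' ' for s in l)
def scanGlyph (rows : List (List Char)) (w i : Nat) : Nat :=
  if i < w ∧ (rows.any (fun s => s.getD i ' ' ≠ ' ')) = true then scanGlyph rows w (i+1) else i
termination_by w - i
decreasing_by omega

def popLetter_alt (l : List String) : Option String :=
  match l with
  | [] => none   -- Python: len(l[0]) raises IndexError; outside Pre_popLetter
  | _ :: _ =>
    let rows := l.map String.toList
    let w0 := (rows.headD []).length
    let start := scanSpaces rows w0 0
    if start = w0 then none
    else
      let e := scanGlyph rows w0 start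
      some (String.intercalate "\n" (rows.map (fun s => String.ofList ((s.drop start).take (e - start)))))

-- ===== PRECONDITION & SPEC =====
-- Pre_ excludes the empty list and ragged inputs where some line is shorter than the first line:
-- there Python A raises IndexError except on accidental corner cases (an all-space column before
-- the short line's end), on which B happens to return the same value anyway.
def Pre_popLetter (l : List String) : Prop :=
  l ≠ [] ∧ ∀ s ∈ l, (l.headD "").toList.length ≤ s.toList.length
instance (l : List String) : Decidable (Pre_popLetter l) := by unfold Pre_popLetter; infer_instance

def pvWitness_popLetter : List String := ["ab ", " cd"]

def Spec_popLetter (l : List String) (out : Option String) : Prop := out = popLetter_alt l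
instance (l : List String) (out : Option String) : Decidable (Spec_popLetter l out) := by unfold Spec_popLetter; infer_instance

-- ===== CLAIM (what is proved, stated in full; the proofs are below) =====
def Claim_equal_popLetter : Prop := ∀ (l : List String), Dom_popLetter l → Pre_popLetter l → Spec_popLetter l (popLetter l)

-- ===== LEMMAS AND PROOFS =====

-- findIA and scanGlyph perform literally the same recursion
lemma findIA_eq_scanGlyph (rows : List (List Char)) (n i : Nat) :
    findIA rows n i = scanGlyph rows n i := by
  generalize hm : n - i = m
  induction m generalizing i with
  | zero =>
    conv_lhs => rw [findIA]
    conv_rhs => rw [scanGlyph]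
    have h : ¬ i < n := by omega
    rw [if_neg (by tauto), if_neg (by tauto)]
  | succ m ih =>
    conv_lhs => rw [findIA]
    conv_rhs => rw [scanGlyph]
    by_cases hc : i < n ∧ (rows.any (fun s => s.getD i ' ' ≠ ' ')) = true
    · rw [if_pos hc, if_pos hc]
      exact ih (i+1) (by omega)
    · rw [if_neg hc, if_neg hc]

lemma scanSpaces_le (rows : List (List Char)) (w i : Nat) (h : i ≤ w) :
    scanSpaces rows w i ≤ w := by
  generalize hm : w - i = m
  induction m generalizing i with
  | zero =>
    rw [scanSpaces, if_neg (by omega : ¬ (i < w ∧ _))]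
    omega
  | succ m ih =>
    rw [scanSpaces]
    split
    · next hc => exact ih (i+1) (by omega) (by omega)
    · omega

lemma scanSpaces_shift (rows : List (List Char)) (w i : Nat) :
    scanSpaces rows (w+1) (i+1) = scanSpaces (rows.map (List.drop 1)) w i + 1 := by
  generalize hm : w - i = m
  induction m generalizing i with
  | zero =>
    conv_lhs => rw [scanSpaces]
    conv_rhs => rw [scanSpaces]
    rw [if_neg (by omega : ¬ (i + 1 < w + 1 ∧ _)), if_neg (by omega : ¬ (i < w ∧ _))]
  | succ m ih =>
    conv_lhs => rw [scanSpaces]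
    conv_rhs => rw [scanSpaces]
    have hall : ((rows.map (List.drop 1)).all (fun s => s.getD i ' ' = ' '))
        = rows.all (fun s => s.getD (i+1) ' ' = ' ') := by
      simp only [List.all_map, Function.comp_def]
      congr 1
      funext s
      simp [List.getD]
    by_cases hc : (rows.all (fun s => s.getD (i+1) ' ' = ' ')) = true
    · rw [if_pos ⟨by omega, hc⟩, if_pos ⟨by omega, by rw [hall]; exact hc⟩]
      exact ih (i+1) (by omega)
    · rw [if_neg (by rw [hall] at *; tauto), if_neg (by rw [hall] at *; tauto)]

lemma scanGlyph_shift (rows : List (List Char)) (w i : Nat) :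
    scanGlyph rows (w+1) (i+1) = scanGlyph (rows.map (List.drop 1)) w i + 1 := by
  generalize hm : w - i = m
  induction m generalizing i with
  | zero =>
    conv_lhs => rw [scanGlyph]
    conv_rhs => rw [scanGlyph]
    rw [if_neg (by omega : ¬ (i + 1 < w + 1 ∧ _)), if_neg (by omega : ¬ (i < w ∧ _))]
  | succ m ih =>
    conv_lhs => rw [scanGlyph]
    conv_rhs => rw [scanGlyph]
    have hany : ((rows.map (List.drop 1)).any (fun s => s.getD i ' ' ≠ ' '))
        = rows.any (fun s => s.getD (i+1) ' ' ≠ ' ') := by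
      simp only [List.any_map, Function.comp_def]
      congr 1
      funext s
      simp [List.getD]
    by_cases hc : (rows.any (fun s => s.getD (i+1) ' ' ≠ ' ')) = true
    · rw [if_pos ⟨by omega, hc⟩, if_pos ⟨by omega, by rw [hany]; exact hc⟩]
      exact ih (i+1) (by omega)
    · rw [if_neg (by rw [hany] at *; tauto), if_neg (by rw [hany] at *; tauto)]

lemma scanGlyph_offset (rows : List (List Char)) (k w : Nat) (h : k ≤ w) :
    scanGlyph rows w k = k + scanGlyph (rows.map (List.drop k)) (w - k) 0 := by
  induction k generalizing rows w with
  | zero =>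
    have : (List.drop 0 : List Char → List Char) = id := funext fun s => List.drop_zero
    rw [this, List.map_id]
    simp
  | succ k ih =>
    obtain ⟨w', rfl⟩ : ∃ w', w = w' + 1 := ⟨w - 1, by omega⟩
    rw [scanGlyph_shift, ih (rows.map (List.drop 1)) w' (by omega)]
    have h1 : (rows.map (List.drop 1)).map (List.drop k) = rows.map (List.drop (k+1)) := by
      rw [List.map_map]
      apply List.map_congr_left
      intro s _
      simp [Function.comp]
    have h2 : w' - k = w' + 1 - (k + 1) := by omega
    rw [h1, h2]
    omega

lemma multistrip_spec (w : Nat) : ∀ (rows : List (List Char)),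
    (rows.headD []).length = w → (∀ s ∈ rows, w ≤ s.length) →
    multistripGo rows w = rows.map (List.drop (scanSpaces rows w 0)) := by
  induction w with
  | zero =>
    intro rows _ _
    rw [multistripGo, scanSpaces, if_neg (by omega : ¬ ((0:Nat) < 0 ∧ _))]
    have : (List.drop 0 : List Char → List Char) = id := funext fun s => List.drop_zero
    rw [this, List.map_id]
  | succ w ih =>
    intro rows hh hlen
    have hne : rows.headD [] ≠ [] := by
      intro h; rw [h] at hh; simp at hh
    rw [multistripGo]
    conv_rhs => rw [scanSpaces]
    by_cases hc : (rows.all (fun s => s.getD 0 ' ' = ' ')) = true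
    · rw [if_pos ⟨hne, hc⟩, if_pos ⟨by omega, hc⟩]
      have hh1 : ((rows.map (List.drop 1)).headD []).length = w := by
        cases rows with
        | nil => simp at hh
        | cons r t => simp at hh ⊢; omega
      have hlen1 : ∀ s ∈ rows.map (List.drop 1), w ≤ s.length := by
        intro s hs
        simp only [List.mem_map] at hs
        obtain ⟨s0, hs0, rfl⟩ := hs
        have := hlen s0 hs0
        simp; omega
      rw [ih (rows.map (List.drop 1)) hh1 hlen1]
      have hstart : scanSpaces rows (w+1) 1 = scanSpaces (rows.map (List.drop 1)) w 0 + 1 :=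
        scanSpaces_shift rows w 0
      rw [hstart, List.map_map]
      apply List.map_congr_left
      intro s _
      simp [Function.comp, Nat.add_comm]
    · rw [if_neg (by tauto), if_neg (by tauto)]
      have : (List.drop 0 : List Char → List Char) = id := funext fun s => List.drop_zero
      rw [this, List.map_id]

theorem popLetter_eq_alt (l : List String) (hpre : Pre_popLetter l) :
    popLetter l = popLetter_alt l := by
  obtain ⟨hne, hlen⟩ := hpre
  cases l with
  | nil => exact absurd rfl hne
  | cons x xs =>
    simp only [popLetter, popLetter_alt]
    set rows := (x :: xs).map String.toList with hrows
    have hhead : rows.headD [] = x.toList := by simp [hrows]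
    set w0 := (rows.headD []).length with hw0
    have hw0x : w0 = x.toList.length := by rw [hw0, hhead]
    have hlen' : ∀ s ∈ rows, w0 ≤ s.length := by
      intro s hs
      simp only [hrows, List.mem_map] at hs
      obtain ⟨s0, hs0, rfl⟩ := hs
      have := hlen s0 hs0
      simpa [hw0x] using this
    set start := scanSpaces rows w0 0 with hstart
    have hstrip : multistripGo rows w0 = rows.map (List.drop start) :=
      multistrip_spec w0 rows rfl hlen'
    have hstart_le : start ≤ w0 := scanSpaces_le rows w0 0 (Nat.zero_le _)
    rw [hstrip]
    have hheadD : (rows.map (List.drop start)).headD [] = x.toList.drop start := by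
      simp [hrows]
    rw [hheadD]
    have hempty : (x.toList.drop start = []) ↔ (start = w0) := by
      rw [List.drop_eq_nil_iff]
      omega
    by_cases hcase : start = w0
    · rw [if_pos (hempty.mpr hcase), if_pos hcase]
    · rw [if_neg (fun h => hcase (hempty.mp h)), if_neg hcase]
      have hlendrop : (x.toList.drop start).length = w0 - start := by
        rw [List.length_drop, hw0x]
      set e := scanGlyph rows w0 start with he
      have hi : findIA (rows.map (List.drop start)) (x.toList.drop start).length 0 = e - start := by
        rw [hlendrop, findIA_eq_scanGlyph]
        have := scanGlyph_offset rows start w0 hstart_le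
        omega
      rw [hi, List.map_map]
      rfl
-- ===== VERDICT (by name: the statement is the Claim_ definition above) =====
theorem popLetter_spec : Claim_equal_popLetter := by
  intro l _ hpre
  unfold Spec_popLetter
  exact popLetter_eq_alt l hpre
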